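-- pv_equiv track=rewrite | github.com/VladChat/blog.equalle.com | blog_src/scripts/writer/text_utils.py | _norm_tag
-- ===== SOURCE A (Python) =====
-- def _norm_tag(s: str) -> str:
--     s = (s or "").strip().lower()
--     if not s:
--         return ""
--     out = []
--     prev_dash = False
--     for ch in s:
--         if ch.isalnum():
--             out.append(ch)
--             prev_dash = False
--         else:
--             if not prev_dash:
--                 out.append("-")
--                 prev_dash = True
--     t = "".join(out).strip("-")
--     while "--" in t:
--         t = t.replace("--", "-")
--     return t[:40]
-- ===== SOURCE B (Python) =====
-- def _norm_tag(s: str) -> str: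
--     # Run-extraction decomposition: collect maximal alphanumeric runs and
--     # dash-join them, instead of A's per-character prev_dash state machine.
--     s = (s or "").strip().lower()
--     runs = []
--     i = 0
--     n = len(s)
--     while i < n:
--         if s[i].isalnum():
--             j = i + 1
--             while j < n and s[j].isalnum():
--                 j += 1
--             runs.append(s[i:j])
--             i = j
--         else:
--             i += 1
--     return "-".join(runs)[:40]
-- ===== Notes on version B (the rewrite author's own statement) =====
-- stated objective: alternative
-- what changed: Replaces A's per-character prev_dash state machine plus strip('-') and '--'-collapse fixup passes with a direct extraction of the maximal alphanumeric runs that are dash-joined and truncated, so no leading/trailing/double-dash cleanup is needed.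
import Mathlib
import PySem

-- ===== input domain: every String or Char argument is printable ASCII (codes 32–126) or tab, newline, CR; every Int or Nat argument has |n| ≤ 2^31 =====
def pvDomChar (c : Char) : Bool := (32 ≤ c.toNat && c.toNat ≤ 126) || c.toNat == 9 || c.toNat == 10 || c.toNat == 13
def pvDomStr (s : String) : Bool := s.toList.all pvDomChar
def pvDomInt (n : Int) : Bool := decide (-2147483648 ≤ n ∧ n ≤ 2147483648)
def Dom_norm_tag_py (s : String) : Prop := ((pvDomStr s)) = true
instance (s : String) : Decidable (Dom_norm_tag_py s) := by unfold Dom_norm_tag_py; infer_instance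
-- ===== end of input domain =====

-- B replaces A's per-character prev_dash state machine (plus strip('-') and '--'-collapse
-- fixup passes) by extracting the maximal alphanumeric runs and dash-joining them.

-- ===== PORT A =====
-- the while "--" in t: t = t.replace("--","-") loop; fuel = t.length + 1 is enough, since
-- each replace that fires removes at least one character.
def pvCollapseGo : Nat → List Char → List Char
  | 0, t => t
  | n + 1, t =>
    if PySem.Chars.isIn ['-', '-'] t then pvCollapseGo n (PySem.Chars.replace t ['-', '-'] ['-'])
    else t

-- port of A; '(s or "")' is 's' for every string argument ("" stays "")
def norm_tag_py (s : String) : String :=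
  let cs := PySem.Chars.lower (PySem.Chars.strip s.toList)
  if cs.isEmpty then ""
  else
    let st := cs.foldl (fun (st : List Char × Bool) ch =>
      if PySem.Chars.isalnum ch then (st.1 ++ [ch], false)
      else if st.2 then st
      else (st.1 ++ ['-'], true)) (([] : List Char), false)
    let t := PySem.Chars.stripChars st.1 ['-']
    String.mk (PySem.List.slice (pvCollapseGo (t.length + 1) t) none (some 40))

-- ===== PORT B =====
-- the outer while of Source B: each step consumes one junk char or one whole alphanumeric run
def pvAltRuns : List Char → List (List Char)
  | [] => []
  | c :: rest =>
    if PySem.Chars.isalnum c then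
      (c :: rest.takeWhile PySem.Chars.isalnum) :: pvAltRuns (rest.dropWhile PySem.Chars.isalnum)
    else pvAltRuns rest
termination_by cs => cs.length
decreasing_by
  · exact Nat.lt_succ_of_le (List.length_dropWhile_le _ _)
  · exact Nat.lt_succ_of_le (Nat.le_refl _)

def norm_tag_py_alt (s : String) : String :=
  let cs := PySem.Chars.lower (PySem.Chars.strip s.toList)
  String.mk ((PySem.Chars.join ['-'] (pvAltRuns cs)).take 40)

-- ===== PRECONDITION & SPEC =====
def Spec_norm_tag_py (s : String) (out : String) : Prop := out = norm_tag_py_alt s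
instance (s : String) (out : String) : Decidable (Spec_norm_tag_py s out) := by unfold Spec_norm_tag_py; infer_instance

-- ===== CLAIM (what is proved, stated in full; the proofs are below) =====
def Claim_equal_norm_tag_py : Prop := ∀ (s : String), Dom_norm_tag_py s → Spec_norm_tag_py s (norm_tag_py s)

-- ===== LEMMAS AND PROOFS =====

-- A's loop as a state machine on (emitted output, prev_dash)
def pvMst : List Char → Bool → List Char × Bool
  | [], prev => ([], prev)
  | c :: t, prev =>
    if PySem.Chars.isalnum c then
      ((c :: (pvMst t false).1), (pvMst t false).2)
    else if prev then pvMst t true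
    else (('-' :: (pvMst t true).1), (pvMst t true).2)

theorem pvFoldl_eq_mst (cs : List Char) : ∀ (acc : List Char) (prev : Bool),
    cs.foldl (fun (st : List Char × Bool) ch =>
      if PySem.Chars.isalnum ch then (st.1 ++ [ch], false)
      else if st.2 then st
      else (st.1 ++ ['-'], true)) (acc, prev)
    = (acc ++ (pvMst cs prev).1, (pvMst cs prev).2) := by
  induction cs with
  | nil => intro acc prev; simp [pvMst]
  | cons c t ih =>
    intro acc prev
    by_cases h : PySem.Chars.isalnum c
    · simp [pvMst, h, ih]
    · by_cases hp : prev <;> simp [pvMst, h, hp, ih]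

def pvJ (cs : List Char) : List Char := PySem.Chars.join ['-'] (pvAltRuns cs)

def pvEndJunk : List Char → Bool
  | [] => false
  | [c] => !PySem.Chars.isalnum c
  | _ :: c :: t => pvEndJunk (c :: t)

def pvLead : List Char → List Char
  | [] => []
  | c :: _ => if PySem.Chars.isalnum c then [] else ['-']

def pvTrail (cs : List Char) : List Char :=
  if pvEndJunk cs && !(pvAltRuns cs).isEmpty then ['-'] else []

theorem pvBeq_dash_false (c : Char) (h : PySem.Chars.isalnum c = true) : (c == '-') = false := by
  cases hq : (c == '-') with
  | false => rfl
  | true =>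
    rw [beq_iff_eq] at hq; subst hq
    have : PySem.Chars.isalnum '-' = false := by decide
    rw [this] at h; cases h

theorem pvDropWhile_head (p : Char → Bool) (l : List Char) (c : Char) (t : List Char)
    (h : l.dropWhile p = c :: t) : p c = false := by
  have h2 : (l.dropWhile p) ≠ [] := by simp [h]
  have := List.head_dropWhile_not p h2
  simp only [h, List.head_cons] at this
  exact this

theorem pvEndJunk_cons (a : Char) (w : List Char) (hw : w ≠ []) :
    pvEndJunk (a :: w) = pvEndJunk w := by
  cases w with
  | nil => exact absurd rfl hw
  | cons b t => rfl

theorem pvEndJunk_append (u v : List Char) (hv : v ≠ []) :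
    pvEndJunk (u ++ v) = pvEndJunk v := by
  induction u with
  | nil => rfl
  | cons a u ih =>
    rw [List.cons_append, pvEndJunk_cons a (u ++ v) (by simp [hv]), ih]

theorem pvEndJunk_false_of_alnum (cs : List Char)
    (h : ∀ c ∈ cs, PySem.Chars.isalnum c = true) : pvEndJunk cs = false := by
  induction cs with
  | nil => rfl
  | cons c t ih =>
    cases t with
    | nil => simp [pvEndJunk, h c (by simp)]
    | cons d t' =>
      rw [pvEndJunk_cons c (d :: t') (by simp)]
      exact ih (fun x hx => h x (by simp [List.mem_cons.mp hx]))

theorem pvEndJunk_true_of_junk (cs : List Char) (hne : cs ≠ [])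
    (h : ∀ c ∈ cs, PySem.Chars.isalnum c = false) : pvEndJunk cs = true := by
  induction cs with
  | nil => exact absurd rfl hne
  | cons c t ih =>
    cases t with
    | nil => simp [pvEndJunk, h c (by simp)]
    | cons d t' =>
      rw [pvEndJunk_cons c (d :: t') (by simp)]
      exact ih (by simp) (fun x hx => h x (by simp [List.mem_cons.mp hx]))

theorem pvJunk_of_altRuns_nil (v : List Char) (h : pvAltRuns v = []) :
    ∀ c ∈ v, PySem.Chars.isalnum c = false := by
  induction v using pvAltRuns.induct with
  | case1 => intro c hc; cases hc
  | case2 c rest hc ih => rw [pvAltRuns] at h; simp [hc] at h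
  | case3 c rest hc ih =>
    rw [pvAltRuns] at h
    simp only [hc] at h
    intro x hx
    rcases List.mem_cons.mp hx with rfl | hx
    · exact Bool.not_eq_true _ ▸ by simpa using hc
    · exact ih h x hx

theorem pvAltRuns_mem (cs : List Char) :
    ∀ r ∈ pvAltRuns cs, r ≠ [] ∧ ∀ c ∈ r, PySem.Chars.isalnum c = true := by
  induction cs using pvAltRuns.induct with
  | case1 => simp [pvAltRuns]
  | case2 c rest hc ih =>
    rw [pvAltRuns]; simp only [hc, if_true]
    intro r hr
    rcases List.mem_cons.mp hr with rfl | hr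
    · refine ⟨by simp, ?_⟩
      intro x hx
      rcases List.mem_cons.mp hx with rfl | hx
      · exact hc
      · exact List.mem_takeWhile_imp hx
    · exact ih r hr
  | case3 c rest hc ih =>
    rw [pvAltRuns]; simp only [hc]; exact ih

theorem pvIntercalate_cons (r : List Char) (rs : List (List Char)) (h : rs ≠ []) :
    List.intercalate ['-'] (r :: rs) = r ++ '-' :: List.intercalate ['-'] rs := by
  obtain ⟨x, xs, rfl⟩ := List.exists_cons_of_ne_nil h
  simp [List.intercalate, List.intersperse]

theorem pvJoinHead (rs : List (List Char)) (hne : rs ≠ [])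
    (hall : ∀ r ∈ rs, r ≠ [] ∧ ∀ c ∈ r, PySem.Chars.isalnum c = true) :
    ∃ c w, List.intercalate ['-'] rs = c :: w ∧ PySem.Chars.isalnum c = true := by
  obtain ⟨r, rs', rfl⟩ := List.exists_cons_of_ne_nil hne
  obtain ⟨hr, hal⟩ := hall r (by simp)
  obtain ⟨x, xs, rfl⟩ := List.exists_cons_of_ne_nil hr
  cases rs' with
  | nil => exact ⟨x, xs, by simp [List.intercalate], hal x (by simp)⟩
  | cons y ys =>
    refine ⟨x, xs ++ '-' :: List.intercalate ['-'] (y :: ys), ?_, hal x (by simp)⟩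
    rw [pvIntercalate_cons _ _ (by simp)]; simp

theorem pvJoinLast (rs : List (List Char)) (hne : rs ≠ [])
    (hall : ∀ r ∈ rs, r ≠ [] ∧ ∀ c ∈ r, PySem.Chars.isalnum c = true) :
    ∃ u d, List.intercalate ['-'] rs = u ++ [d] ∧ PySem.Chars.isalnum d = true := by
  induction rs with
  | nil => exact absurd rfl hne
  | cons r rs' ih =>
    obtain ⟨hr, hal⟩ := hall r (by simp)
    cases rs' with
    | nil =>
      refine ⟨r.dropLast, r.getLast hr, by simp [List.intercalate, List.dropLast_concat_getLast hr],
        hal _ (List.getLast_mem hr)⟩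
    | cons y ys =>
      obtain ⟨u, d, hu, hd⟩ := ih (by simp) (fun x hx => hall x (by simp [hx]))
      refine ⟨r ++ '-' :: u, d, ?_, hd⟩
      rw [pvIntercalate_cons _ _ (by simp), hu]; simp

-- no two adjacent dashes
def pvNoDD : List Char → Bool
  | c1 :: c2 :: t => !(c1 == '-' && c2 == '-') && pvNoDD (c2 :: t)
  | _ => true

theorem pvNoDD_tail (a : Char) (t : List Char) (h : pvNoDD (a :: t) = true) : pvNoDD t = true := by
  cases t with
  | nil => rfl
  | cons b u => simp [pvNoDD] at h; exact h.2

theorem pvNoDD_append_alnum (u : List Char) (h : ∀ c ∈ u, PySem.Chars.isalnum c = true)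
    (v : List Char) : pvNoDD (u ++ v) = pvNoDD v := by
  induction u with
  | nil => rfl
  | cons a u ih =>
    have ha := pvBeq_dash_false a (h a (by simp))
    have ih' := ih (fun x hx => h x (by simp [hx]))
    rw [List.cons_append]
    cases hw : u ++ v with
    | nil =>
      have hv : v = [] := by rcases List.append_eq_nil_iff.mp hw with ⟨_, h2⟩; exact h2
      simp [pvNoDD, hv]
    | cons b w => rw [← hw, show pvNoDD (a :: (u ++ v)) = (!(a == '-' && ((u ++ v).headD 'x' == '-')) && pvNoDD (u ++ v)) from by rw [hw]; rfl, ha]; simp [ih']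

theorem pvJoinNoDD (rs : List (List Char))
    (hall : ∀ r ∈ rs, r ≠ [] ∧ ∀ c ∈ r, PySem.Chars.isalnum c = true) :
    pvNoDD (List.intercalate ['-'] rs) = true := by
  induction rs with
  | nil => rfl
  | cons r rs' ih =>
    obtain ⟨hr, hal⟩ := hall r (by simp)
    cases rs' with
    | nil => rw [show List.intercalate ['-'] [r] = r ++ [] from by simp [List.intercalate],
        pvNoDD_append_alnum r hal]; rfl
    | cons y ys =>
      rw [pvIntercalate_cons _ _ (by simp), pvNoDD_append_alnum r hal]
      obtain ⟨c, w, hcw, hc⟩ := pvJoinHead (y :: ys) (by simp) (fun x hx => hall x (by simp [hx]))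
      rw [hcw]
      have := ih (fun x hx => hall x (by simp [hx]))
      rw [hcw] at this
      simp [pvNoDD, pvBeq_dash_false c hc, this]

-- consuming an all-alphanumeric prefix
theorem pvMst_alnum_prefix (u : List Char) (h : ∀ c ∈ u, PySem.Chars.isalnum c = true)
    (v : List Char) : pvMst (u ++ v) false = ((u ++ (pvMst v false).1), (pvMst v false).2) := by
  induction u with
  | nil => simp
  | cons c t ih =>
    have hc := h c (by simp)
    simp only [List.cons_append, pvMst, hc, if_true, ih (fun x hx => h x (by simp [hx]))]

-- the heart: A's machine output = lead ++ dash-joined runs ++ trail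
theorem pvMst_struct (cs : List Char) :
    (pvMst cs false).1 = pvLead cs ++ pvJ cs ++ pvTrail cs ∧
    (pvMst cs true).1 = pvJ cs ++ pvTrail cs := by
  induction cs using pvAltRuns.induct with
  | case1 => simp [pvMst, pvJ, pvAltRuns, PySem.Chars.join, List.intercalate, pvLead, pvTrail, pvEndJunk]
  | case2 c rest hc ih =>
    have htw : ∀ x ∈ rest.takeWhile PySem.Chars.isalnum, PySem.Chars.isalnum x = true :=
      fun x hx => List.mem_takeWhile_imp hx
    have hsplit : rest.takeWhile PySem.Chars.isalnum ++ rest.dropWhile PySem.Chars.isalnum = rest :=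
      List.takeWhile_append_dropWhile
    have hruns : pvAltRuns (c :: rest)
        = (c :: rest.takeWhile PySem.Chars.isalnum) :: pvAltRuns (rest.dropWhile PySem.Chars.isalnum) := by
      rw [pvAltRuns]; simp [hc]
    have hmf : (pvMst (c :: rest) false).1
        = c :: (rest.takeWhile PySem.Chars.isalnum ++ (pvMst (rest.dropWhile PySem.Chars.isalnum) false).1) := by
      have h2 := pvMst_alnum_prefix (rest.takeWhile PySem.Chars.isalnum) htw (rest.dropWhile PySem.Chars.isalnum)
      rw [hsplit] at h2
      simp [pvMst, hc, h2]
    have hmt : (pvMst (c :: rest) true).1 = (pvMst (c :: rest) false).1 := by simp [pvMst, hc]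
    have hlead : pvLead (c :: rest) = [] := by simp [pvLead, hc]
    cases hdw : rest.dropWhile PySem.Chars.isalnum with
    | nil =>
      have hrest : rest.takeWhile PySem.Chars.isalnum = rest := by
        have h4 := hsplit; rw [hdw, List.append_nil] at h4; exact h4
      have hJ : pvJ (c :: rest) = c :: rest.takeWhile PySem.Chars.isalnum := by
        rw [pvJ, PySem.Chars.join, hruns, hdw]; simp [pvAltRuns, List.intercalate]
      have hT : pvTrail (c :: rest) = [] := by
        have : pvEndJunk (c :: rest) = false := by
          refine pvEndJunk_false_of_alnum _ ?_
          intro x hx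
          rcases List.mem_cons.mp hx with rfl | hx
          · exact hc
          · exact htw x (by rw [hrest]; exact hx)
        simp [pvTrail, this]
      rw [hmt, hmf, hdw, hlead, hJ, hT]
      simp [pvMst]
    | cons e t =>
      have hdw' : rest.dropWhile PySem.Chars.isalnum ≠ [] := by rw [hdw]; simp
      have hrne : rest ≠ [] := by
        intro h4; rw [h4] at hdw; simp at hdw
      have hEJ : pvEndJunk (c :: rest) = pvEndJunk (rest.dropWhile PySem.Chars.isalnum) := by
        rw [pvEndJunk_cons c rest hrne]
        conv_lhs => rw [← hsplit]
        exact pvEndJunk_append _ _ hdw'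
      by_cases hrdw : pvAltRuns (rest.dropWhile PySem.Chars.isalnum) = []
      · have hjunk := pvJunk_of_altRuns_nil _ hrdw
        have hJdw : pvJ (rest.dropWhile PySem.Chars.isalnum) = [] := by
          simp [pvJ, hrdw, PySem.Chars.join, List.intercalate]
        have hTdw : pvTrail (rest.dropWhile PySem.Chars.isalnum) = [] := by
          simp [pvTrail, hrdw]
        have hLdw : pvLead (rest.dropWhile PySem.Chars.isalnum) = ['-'] := by
          rw [hdw]; simp [pvLead, pvDropWhile_head PySem.Chars.isalnum rest e t hdw]
        have hJ : pvJ (c :: rest) = c :: rest.takeWhile PySem.Chars.isalnum := by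
          rw [pvJ, PySem.Chars.join, hruns, hrdw]; simp [List.intercalate]
        have hT : pvTrail (c :: rest) = ['-'] := by
          have hej : pvEndJunk (c :: rest) = true := by
            rw [hEJ]; exact pvEndJunk_true_of_junk _ hdw' hjunk
          simp [pvTrail, hej, hruns]
        rw [hmt, hmf, (ih).1, hlead, hJ, hT, hJdw, hTdw, hLdw]
        simp
      · have hJ : pvJ (c :: rest)
            = (c :: rest.takeWhile PySem.Chars.isalnum) ++ '-' :: pvJ (rest.dropWhile PySem.Chars.isalnum) := by
          rw [pvJ, PySem.Chars.join, hruns, pvIntercalate_cons _ _ hrdw]; rfl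
        have hT : pvTrail (c :: rest) = pvTrail (rest.dropWhile PySem.Chars.isalnum) := by
          simp [pvTrail, hEJ, hruns, List.isEmpty_eq_false_iff.mpr hrdw]
        have hLdw : pvLead (rest.dropWhile PySem.Chars.isalnum) = ['-'] := by
          rw [hdw]; simp [pvLead, pvDropWhile_head PySem.Chars.isalnum rest e t hdw]
        rw [hmt, hmf, (ih).1, hlead, hJ, hT, hLdw]
        simp
  | case3 c rest hc ih =>
    have hc' : PySem.Chars.isalnum c = false := by simpa using hc
    have hruns : pvAltRuns (c :: rest) = pvAltRuns rest := by rw [pvAltRuns]; simp [hc']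
    have hJ : pvJ (c :: rest) = pvJ rest := by rw [pvJ, pvJ, hruns]
    have hmf : (pvMst (c :: rest) false).1 = '-' :: (pvMst rest true).1 := by
      simp [pvMst, hc']
    have hmt : (pvMst (c :: rest) true).1 = (pvMst rest true).1 := by
      simp [pvMst, hc']
    have hlead : pvLead (c :: rest) = ['-'] := by simp [pvLead, hc']
    cases rest with
    | nil =>
      have h0 : pvAltRuns ([] : List Char) = [] := by simp [pvAltRuns]
      constructor
      · rw [hmf, hlead, hJ]
        simp [pvMst, pvJ, h0, pvTrail, PySem.Chars.join, List.intercalate, pvEndJunk]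
        exact fun _ => by rw [hruns, h0]
      · rw [hmt, hJ]
        simp [pvMst, pvJ, h0, pvTrail, PySem.Chars.join, List.intercalate, pvEndJunk]
        exact fun _ => by rw [hruns, h0]
    | cons d t =>
      have hT : pvTrail (c :: d :: t) = pvTrail (d :: t) := by
        simp [pvTrail, pvEndJunk_cons c (d :: t) (by simp), hruns]
      constructor
      · rw [hmf, ih.2, hlead, hJ, hT]; rfl
      · rw [hmt, ih.2, hJ, hT]
theorem pvJ_head (cs : List Char) (h : pvAltRuns cs ≠ []) :
    ∃ c w, pvJ cs = c :: w ∧ PySem.Chars.isalnum c = true :=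
  pvJoinHead _ h (pvAltRuns_mem cs)

theorem pvJ_last (cs : List Char) (h : pvAltRuns cs ≠ []) :
    ∃ u d, pvJ cs = u ++ [d] ∧ PySem.Chars.isalnum d = true :=
  pvJoinLast _ h (pvAltRuns_mem cs)

theorem pvLead_cases (cs : List Char) : pvLead cs = [] ∨ pvLead cs = ['-'] := by
  cases cs with
  | nil => exact Or.inl rfl
  | cons c t =>
    by_cases h : PySem.Chars.isalnum c
    · exact Or.inl (by simp [pvLead, h])
    · exact Or.inr (by simp [pvLead, h])

theorem pvTrail_cases (cs : List Char) : pvTrail cs = [] ∨ pvTrail cs = ['-'] := by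
  unfold pvTrail; split <;> [exact Or.inr rfl; exact Or.inl rfl]

theorem pvStrip_struct (cs : List Char) :
    PySem.Chars.stripChars (pvLead cs ++ pvJ cs ++ pvTrail cs) ['-'] = pvJ cs := by
  by_cases h : pvAltRuns cs = []
  · have hJ : pvJ cs = [] := by simp [pvJ, h, PySem.Chars.join, List.intercalate]
    have hT : pvTrail cs = [] := by simp [pvTrail, h]
    rcases pvLead_cases cs with hL | hL <;>
      simp [hL, hJ, hT, PySem.Chars.stripChars, List.dropWhile]
  · obtain ⟨c0, w, hJh, hc0⟩ := pvJ_head cs h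
    obtain ⟨u, d, hJl, hd⟩ := pvJ_last cs h
    have hne0 : c0 ≠ '-' := by
      intro e; subst e; have : PySem.Chars.isalnum '-' = false := by decide
      rw [this] at hc0; cases hc0
    have hned : d ≠ '-' := by
      intro e; subst e; have : PySem.Chars.isalnum '-' = false := by decide
      rw [this] at hd; cases hd
    have step1 : List.dropWhile (fun x => ['-'].contains x) (pvLead cs ++ pvJ cs ++ pvTrail cs)
        = pvJ cs ++ pvTrail cs := by
      rcases pvLead_cases cs with hL | hL <;>
        rw [hL] <;> simp only [List.nil_append, List.cons_append] <;>
        rw [hJh] <;> simp [List.dropWhile, hne0]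
    have step2 : List.dropWhile (fun x => ['-'].contains x) ((pvJ cs ++ pvTrail cs).reverse)
        = (pvJ cs).reverse := by
      rw [List.reverse_append]
      rcases pvTrail_cases cs with hT | hT <;>
        rw [hT] <;> rw [hJl] <;> simp [List.dropWhile, hned]
    simp only [PySem.Chars.stripChars]
    rw [step1, step2, List.reverse_reverse]

theorem pvNoDD_J (cs : List Char) : pvNoDD (pvJ cs) = true := by
  rw [show pvJ cs = List.intercalate ['-'] (pvAltRuns cs) from rfl]
  exact pvJoinNoDD _ (pvAltRuns_mem cs)

theorem pvNotIn_of_noDD (t : List Char) (h : pvNoDD t = true) :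
    PySem.Chars.isIn ['-', '-'] t = false := by
  rw [PySem.Chars.isIn_eq_false_iff]
  rintro ⟨l, r, rfl⟩
  induction l with
  | nil => simp [pvNoDD] at h
  | cons a l ih => exact ih (pvNoDD_tail _ _ h)

theorem pvCollapse_eq (n : Nat) (t : List Char) (h : PySem.Chars.isIn ['-', '-'] t = false) :
    pvCollapseGo n t = t := by
  cases n with
  | zero => rfl
  | succ n => simp [pvCollapseGo, h]

theorem pvSlice40 (t : List Char) : PySem.List.slice t none (some 40) = t.take 40 := by
  simp [PySem.List.slice, PySem.List.clampIdx]

-- ===== VERDICT (by name: the statement is the Claim_ definition above) =====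
theorem norm_tag_py_spec : Claim_equal_norm_tag_py := by
  intro s _
  unfold Spec_norm_tag_py norm_tag_py norm_tag_py_alt
  set cs := PySem.Chars.lower (PySem.Chars.strip s.toList) with hcs
  by_cases h : cs.isEmpty
  · simp only [h, if_true]
    have : pvAltRuns cs = [] := by
      rw [List.isEmpty_iff] at h; rw [h]; simp [pvAltRuns]
    simp [this, PySem.Chars.join]
    rfl
  · simp only [h]
    rw [pvFoldl_eq_mst]
    simp only [List.nil_append]
    rw [(pvMst_struct cs).1, pvStrip_struct cs,
        pvCollapse_eq _ _ (pvNotIn_of_noDD _ (pvNoDD_J cs)), pvSlice40]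
    rfl
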